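-- pv_equiv track=rewrite | github.com/harishkannann05/kanini_hackathon_app | backend/services/triage_service.py | _determine_department
-- ===== SOURCE A (Python) =====
-- SYMPTOM_DEPT_MAP = {
--     "chest pain": "Cardiology",
--     "palpitations": "Cardiology",
--     "shortness of breath": "Pulmonology",
--     "cough": "Pulmonology",
--     "headache": "Neurology",
--     "dizziness": "Neurology",
--     "numbness": "Neurology",
--     "abdominal pain": "Gastroenterology",
--     "vomiting": "Gastroenterology",
--     "diarrhea": "Gastroenterology",
--     "fever": "General Medicine",
--     "weakness": "General Medicine",
-- }
--
-- DEPT_PRIORITY = ["Cardiology", "Neurology", "Pulmonology", "Gastroenterology", "General Medicine"]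
--
-- def _determine_department(symptoms: list[str]) -> str:
--     """Pick highest-priority department based on symptom list."""
--     dept_hits: dict[str, int] = {}
--     for s in symptoms:
--         dept = SYMPTOM_DEPT_MAP.get(s.lower().strip())
--         if dept:
--             dept_hits[dept] = dept_hits.get(dept, 0) + 1
--
--     if not dept_hits:
--         return "General Medicine"
--
--     for dept in DEPT_PRIORITY:
--         if dept in dept_hits:
--             return dept
--     return "General Medicine"
-- ===== SOURCE B (Python) =====
-- SYMPTOM_DEPT_MAP = {
--     "chest pain": "Cardiology",
--     "palpitations": "Cardiology",
--     "shortness of breath": "Pulmonology",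
--     "cough": "Pulmonology",
--     "headache": "Neurology",
--     "dizziness": "Neurology",
--     "numbness": "Neurology",
--     "abdominal pain": "Gastroenterology",
--     "vomiting": "Gastroenterology",
--     "diarrhea": "Gastroenterology",
--     "fever": "General Medicine",
--     "weakness": "General Medicine",
-- }
--
-- DEPT_PRIORITY = ["Cardiology", "Neurology", "Pulmonology", "Gastroenterology", "General Medicine"]
--
-- _RANK = {d: i for i, d in enumerate(DEPT_PRIORITY)}
--
-- def _determine_department(symptoms: list[str]) -> str:
--     """Single pass keeping the best-ranked (lowest index) department seen so far."""
--     best = None  # (rank, dept)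
--     for s in symptoms:
--         dept = SYMPTOM_DEPT_MAP.get(s.lower().strip())
--         if dept:
--             r = _RANK[dept]
--             if best is None or r < best[0]:
--                 best = (r, dept)
--     return best[1] if best is not None else "General Medicine"
-- ===== Notes on version B (the rewrite author's own statement) =====
-- stated objective: simpler
-- what changed: Replaces the two-phase dict-of-counts build plus priority re-scan with a single pass that keeps a running minimum-rank winner via a precomputed department-to-rank index.
import Mathlib
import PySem

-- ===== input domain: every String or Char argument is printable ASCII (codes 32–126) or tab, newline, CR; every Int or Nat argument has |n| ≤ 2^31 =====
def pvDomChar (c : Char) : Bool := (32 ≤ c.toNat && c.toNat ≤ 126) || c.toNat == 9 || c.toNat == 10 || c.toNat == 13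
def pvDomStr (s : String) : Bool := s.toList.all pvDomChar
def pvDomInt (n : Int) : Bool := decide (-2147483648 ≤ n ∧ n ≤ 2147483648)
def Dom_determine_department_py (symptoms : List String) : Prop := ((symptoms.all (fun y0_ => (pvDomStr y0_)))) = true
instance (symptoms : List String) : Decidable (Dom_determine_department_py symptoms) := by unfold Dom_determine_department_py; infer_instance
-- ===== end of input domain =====

-- B fuses A's count-building dict pass and priority re-scan into one pass keeping a running min-rank winner (objective: simpler).

-- ===== PORT A =====
-- module constants shared by both Pythons
def SYMPTOM_DEPT_MAP : PySem.Dict String String := PySem.Dict.ofList [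
  ("chest pain", "Cardiology"),
  ("palpitations", "Cardiology"),
  ("shortness of breath", "Pulmonology"),
  ("cough", "Pulmonology"),
  ("headache", "Neurology"),
  ("dizziness", "Neurology"),
  ("numbness", "Neurology"),
  ("abdominal pain", "Gastroenterology"),
  ("vomiting", "Gastroenterology"),
  ("diarrhea", "Gastroenterology"),
  ("fever", "General Medicine"),
  ("weakness", "General Medicine")]

def DEPT_PRIORITY : List String := ["Cardiology", "Neurology", "Pulmonology", "Gastroenterology", "General Medicine"]

-- s.lower().strip()
def pvNorm (s : String) : String := PySem.Str.strip (PySem.Str.lower s)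

-- loop body of A: SYMPTOM_DEPT_MAP.get(...); 'if dept' is truthiness, exact here since no map value is "" or None
def astep (d : PySem.Dict String Int) (s : String) : PySem.Dict String Int :=
  match SYMPTOM_DEPT_MAP.get? (pvNorm s) with
  | some dept => d.insert dept (d.getD dept 0 + 1)
  | none => d

def determine_department_py (symptoms : List String) : String :=
  let dept_hits := symptoms.foldl astep PySem.Dict.empty
  if dept_hits.items = [] then "General Medicine"
  else
    match DEPT_PRIORITY.find? (fun dept => dept_hits.contains dept) with
    | some dept => dept
    | none => "General Medicine"

-- ===== PORT B =====
-- _RANK = {d: i for i, d in enumerate(DEPT_PRIORITY)}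
def pvRANK : PySem.Dict String Int :=
  (PySem.List.enumerate DEPT_PRIORITY).foldl (fun d p => d.insert p.2 p.1) PySem.Dict.empty

-- loop body of B; _RANK[dept] is total here (every map value is in DEPT_PRIORITY), ported as getD
def bstep (best : Option (Int × String)) (s : String) : Option (Int × String) :=
  match SYMPTOM_DEPT_MAP.get? (pvNorm s) with
  | some dept =>
    let r := pvRANK.getD dept 0
    match best with
    | none => some (r, dept)
    | some (br, bd) => if r < br then some (r, dept) else some (br, bd)
  | none => best

def determine_department_py_alt (symptoms : List String) : String :=
  match symptoms.foldl bstep none with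
  | some (_, dept) => dept
  | none => "General Medicine"

-- ===== PRECONDITION & SPEC =====
def Spec_determine_department_py (symptoms : List String) (out : String) : Prop := out = determine_department_py_alt symptoms
instance (symptoms : List String) (out : String) : Decidable (Spec_determine_department_py symptoms out) := by unfold Spec_determine_department_py; infer_instance

-- ===== CLAIM (what is proved, stated in full; the proofs are below) =====
def Claim_equal_determine_department_py : Prop := ∀ (symptoms : List String), Dom_determine_department_py symptoms → Spec_determine_department_py symptoms (determine_department_py symptoms)

-- ===== LEMMAS AND PROOFS =====

-- abstraction: the first priority department present in the dict, with its rank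
def firstHit (d : PySem.Dict String Int) : Option (Int × String) :=
  if d.contains "Cardiology" then some (0, "Cardiology")
  else if d.contains "Neurology" then some (1, "Neurology")
  else if d.contains "Pulmonology" then some (2, "Pulmonology")
  else if d.contains "Gastroenterology" then some (3, "Gastroenterology")
  else if d.contains "General Medicine" then some (4, "General Medicine")
  else none

lemma map_value_mem (x v : String) (h : SYMPTOM_DEPT_MAP.get? x = some v) : v ∈ DEPT_PRIORITY := by
  have hv : (x, v) ∈ SYMPTOM_DEPT_MAP.items := PySem.Dict.mem_items_of_get?_eq_some _ h
  have hitems : SYMPTOM_DEPT_MAP.items = [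
    ("chest pain", "Cardiology"), ("palpitations", "Cardiology"),
    ("shortness of breath", "Pulmonology"), ("cough", "Pulmonology"),
    ("headache", "Neurology"), ("dizziness", "Neurology"), ("numbness", "Neurology"),
    ("abdominal pain", "Gastroenterology"), ("vomiting", "Gastroenterology"),
    ("diarrhea", "Gastroenterology"), ("fever", "General Medicine"),
    ("weakness", "General Medicine")] := by rfl
  rw [hitems] at hv
  simp only [List.mem_cons, List.not_mem_nil, or_false, Prod.mk.injEq] at hv
  rcases hv with ⟨_,rfl⟩|⟨_,rfl⟩|⟨_,rfl⟩|⟨_,rfl⟩|⟨_,rfl⟩|⟨_,rfl⟩|⟨_,rfl⟩|⟨_,rfl⟩|⟨_,rfl⟩|⟨_,rfl⟩|⟨_,rfl⟩|⟨_,rfl⟩ <;> simp [DEPT_PRIORITY]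

lemma step_firstHit (d : PySem.Dict String Int) (dept : String) (hd : dept ∈ DEPT_PRIORITY) (v : Int) :
    (match firstHit d with
      | none => some (pvRANK.getD dept 0, dept)
      | some (br, bd) => if pvRANK.getD dept 0 < br then some (pvRANK.getD dept 0, dept) else some (br, bd))
    = firstHit (d.insert dept v) := by
  have r1 : pvRANK.getD "Cardiology" 0 = 0 := by rfl
  have r2 : pvRANK.getD "Neurology" 0 = 1 := by rfl
  have r3 : pvRANK.getD "Pulmonology" 0 = 2 := by rfl
  have r4 : pvRANK.getD "Gastroenterology" 0 = 3 := by rfl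
  have r5 : pvRANK.getD "General Medicine" 0 = 4 := by rfl
  fin_cases hd <;>
  · by_cases c1 : d.contains "Cardiology" <;>
    by_cases c2 : d.contains "Neurology" <;>
    by_cases c3 : d.contains "Pulmonology" <;>
    by_cases c4 : d.contains "Gastroenterology" <;>
    by_cases c5 : d.contains "General Medicine" <;>
    simp [firstHit, PySem.Dict.contains_insert, c1, c2, c3, c4, c5, r1, r2, r3, r4, r5]

lemma loop_inv (symptoms : List String) :
    ∀ (d : PySem.Dict String Int),
      (∀ k ∈ d.keys, k ∈ DEPT_PRIORITY) →
      (symptoms.foldl bstep (firstHit d)) = firstHit (symptoms.foldl astep d) ∧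
      (∀ k ∈ (symptoms.foldl astep d).keys, k ∈ DEPT_PRIORITY) := by
  induction symptoms with
  | nil => intro d hsub; exact ⟨rfl, hsub⟩
  | cons s rest ih =>
    intro d hsub
    simp only [List.foldl_cons]
    rcases hm : SYMPTOM_DEPT_MAP.get? (pvNorm s) with _ | dept
    · have ha : astep d s = d := by simp [astep, hm]
      have hb : bstep (firstHit d) s = firstHit d := by simp [bstep, hm]
      rw [ha, hb]; exact ih d hsub
    · have hdept := map_value_mem _ _ hm
      have ha : astep d s = d.insert dept (d.getD dept 0 + 1) := by simp [astep, hm]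
      have hb : bstep (firstHit d) s = firstHit (d.insert dept (d.getD dept 0 + 1)) := by
        simp only [bstep, hm]
        exact step_firstHit d dept hdept _
      rw [ha, hb]
      apply ih
      intro k hk
      rcases (PySem.Dict.mem_keys_insert _ _ _ _).mp hk with h | h
      · exact h ▸ hdept
      · exact hsub k h

lemma final_eq (d : PySem.Dict String Int) :
    (if d.items = [] then "General Medicine"
     else match DEPT_PRIORITY.find? (fun dept => d.contains dept) with
          | some dept => dept
          | none => "General Medicine")
    = (match firstHit d with
       | some (_, dept) => dept
       | none => "General Medicine") := by
  by_cases he : d.items = []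
  · have hc : ∀ x, d.contains x = false := by
      intro x
      rw [PySem.Dict.contains_eq_decide_mem_keys]
      simp [PySem.Dict.keys, he]
    simp [he, firstHit, hc]
  · by_cases c1 : d.contains "Cardiology" <;>
    by_cases c2 : d.contains "Neurology" <;>
    by_cases c3 : d.contains "Pulmonology" <;>
    by_cases c4 : d.contains "Gastroenterology" <;>
    by_cases c5 : d.contains "General Medicine" <;>
    simp [he, firstHit, DEPT_PRIORITY, List.find?, c1, c2, c3, c4, c5]

-- ===== VERDICT (by name: the statement is the Claim_ definition above) =====
theorem determine_department_py_spec : Claim_equal_determine_department_py := by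
  intro symptoms _
  unfold Spec_determine_department_py determine_department_py determine_department_py_alt
  have hstart : (firstHit PySem.Dict.empty) = none := by decide
  obtain ⟨hfold, -⟩ := loop_inv symptoms PySem.Dict.empty (by simp [PySem.Dict.keys_empty])
  rw [hstart] at hfold
  rw [hfold]
  exact final_eq _
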